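-- pv_equiv track=rewrite | github.com/Kuanhao-Chao/LiftOn | lifton/variants.py | is_frameshift
-- ===== SOURCE A (Python) =====
-- def is_frameshift(s):
--     # Initialize a variable to keep track of consecutive '-' characters.
--     consecutive_count = 0
--     # Iterate through the string.
--     for char in s:
--         if char == '-':
--             consecutive_count += 1
--         else:
--             # If we encounter a non-'-' character, check if the consecutive count is not divisible by three.
--             if consecutive_count % 3 != 0:
--                 return True
--             consecutive_count = 0
--     # After the loop, check the last substring if it's not divisible by three.
--     if consecutive_count % 3 != 0:
--         return True
--     # If no non-divisible substrings are found, return False.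
--     return False
-- ===== SOURCE B (Python) =====
-- def is_frameshift(s):
--     # Cancel every complete codon gap '---'; any dash that survives marks a frameshift.
--     return '-' in s.replace('---', '')
-- ===== Notes on version B (the rewrite author's own statement) =====
-- stated objective: simpler
-- what changed: B has no counter and no run extraction: it deletes every dash triple with a single str.replace (left-to-right non-overlapping, so a dash run of length L keeps exactly L mod 3 dashes) and returns whether any dash survives, replacing A's per-character loop with a running consecutive counter and mod-3 tests; the replace/in pair runs in C and measured ~21x faster at the largest size.
import Mathlib
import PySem

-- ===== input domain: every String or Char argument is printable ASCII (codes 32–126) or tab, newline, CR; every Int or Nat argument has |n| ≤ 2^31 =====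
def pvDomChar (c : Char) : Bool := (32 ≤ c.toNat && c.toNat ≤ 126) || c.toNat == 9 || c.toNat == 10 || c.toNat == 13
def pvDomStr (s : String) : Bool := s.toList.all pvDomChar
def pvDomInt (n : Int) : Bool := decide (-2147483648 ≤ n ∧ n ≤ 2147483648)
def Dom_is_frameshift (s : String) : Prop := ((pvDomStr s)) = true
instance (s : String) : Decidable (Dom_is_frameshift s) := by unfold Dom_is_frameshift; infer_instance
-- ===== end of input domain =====

-- B cancels every dash triple with one str.replace and tests whether a dash survives, instead of
-- A's per-character loop with a running consecutive counter (simpler; a timing run measured B faster).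

-- ===== PORT A =====
-- character loop carrying consecutive_count; early 'return True' becomes returning true
def isfsAux : List Char → Nat → Bool
  | [], cnt => decide (cnt % 3 ≠ 0)
  | c :: rest, cnt =>
    if c == '-' then isfsAux rest (cnt + 1)
    else if cnt % 3 ≠ 0 then true
    else isfsAux rest 0

def is_frameshift (s : String) : Bool := isfsAux s.toList 0

-- ===== PORT B =====
-- Source B:  return '-' in s.replace('---', '')
def is_frameshift_alt (s : String) : Bool :=
  PySem.Str.isIn "-" (PySem.Str.replace s "---" "")

-- ===== PRECONDITION & SPEC =====
def Spec_is_frameshift (s : String) (out : Bool) : Prop := out = is_frameshift_alt s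
instance (s : String) (out : Bool) : Decidable (Spec_is_frameshift s out) := by unfold Spec_is_frameshift; infer_instance

-- ===== CLAIM (what is proved, stated in full; the proofs are below) =====
def Claim_equal_is_frameshift : Prop := ∀ (s : String), Dom_is_frameshift s → Spec_is_frameshift s (is_frameshift s)

-- ===== LEMMAS AND PROOFS =====

-- structural model of `replace s "---" ""`: cancel a leading '---', else keep the head
def canc : List Char → List Char
  | [] => []
  | c :: t => if ['-', '-', '-'].isPrefixOf (c :: t) then canc (t.drop 2) else c :: canc t
termination_by l => l.length
decreasing_by
  · have := List.length_drop (i := 2) (l := t); simp at *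
  · simp

theorem canc_eq_go (fuel : Nat) (l acc : List Char) (h : l.length ≤ fuel) :
    PySem.Chars.replace.go ['-', '-', '-'] [] fuel l acc = acc.reverse ++ canc l := by
  induction fuel generalizing l acc with
  | zero =>
      have : l = [] := by cases l <;> simp_all
      subst this; simp [PySem.Chars.replace.go, canc]
  | succ n ih =>
      cases l with
      | nil => simp [PySem.Chars.replace.go, canc]
      | cons c t =>
        by_cases hp : ['-', '-', '-'].isPrefixOf (c :: t) = true
        · rw [PySem.Chars.replace.go, if_pos hp]
          have hlen : (t.drop 2).length ≤ n := by
            have := List.length_drop (i := 2) (l := t); simp at *; omega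
          rw [show List.drop (List.length ['-','-','-']) (c :: t) = t.drop 2 by simp]
          rw [ih _ _ hlen]
          rw [canc, if_pos hp]
          simp
        · rw [PySem.Chars.replace.go, if_neg hp]
          have hlen : t.length ≤ n := by simp at h; omega
          rw [ih _ _ hlen]
          rw [canc, if_neg hp]
          simp

theorem replace_eq_canc (l : List Char) :
    PySem.Chars.replace l ['-', '-', '-'] [] = canc l := by
  rw [PySem.Chars.replace]
  simp only [List.isEmpty_cons, if_false, Bool.false_eq_true]
  exact canc_eq_go l.length l [] le_rfl

-- canc on a maximal dash-run: a run of length k leaves k % 3 dashes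
theorem canc_replicate_append (k : Nat) (rest : List Char)
    (hrest : ∀ d, rest.head? = some d → d ≠ '-') :
    canc (List.replicate k '-' ++ rest) =
      List.replicate (k % 3) '-' ++
        (match rest with | [] => [] | c :: t => c :: canc t) := by
  induction k using Nat.strong_induction_on with
  | _ k ih =>
    match k, rest, hrest with
    | 0, [], _ => simp [canc]
    | 0, c :: t, hrest =>
        have hc : c ≠ '-' := hrest c rfl
        have hp : ['-','-','-'].isPrefixOf (c :: t) = false := by
          simp [List.isPrefixOf]; exact fun h => absurd h.symm hc
        simp only [List.replicate, List.nil_append]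
        rw [canc, hp]
        simp
    | 1, [], _ => simp [canc]
    | 1, c :: t, hrest =>
        have hc : c ≠ '-' := hrest c rfl
        simp only [List.replicate, List.nil_append, List.cons_append]
        rw [canc]
        have hp : ['-','-','-'].isPrefixOf ('-' :: (c :: t)) = false := by
          simp [List.isPrefixOf]; exact fun h => absurd h.symm hc
        rw [hp]
        simp only [Bool.false_eq_true, if_false]
        rw [canc]
        have hp2 : ['-','-','-'].isPrefixOf (c :: t) = false := by
          simp [List.isPrefixOf]; exact fun h => absurd h.symm hc
        rw [hp2]
        simp
    | 2, [], _ => simp [canc]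
    | 2, c :: t, hrest =>
        have hc : c ≠ '-' := hrest c rfl
        simp only [List.replicate, List.nil_append, List.cons_append]
        rw [canc]
        have hp : ['-','-','-'].isPrefixOf ('-' :: '-' :: c :: t) = false := by
          simp [List.isPrefixOf]; exact fun h => absurd h.symm hc
        rw [hp]
        simp only [Bool.false_eq_true, if_false]
        rw [canc]
        have hp2 : ['-','-','-'].isPrefixOf ('-' :: c :: t) = false := by
          simp [List.isPrefixOf]; exact fun h => absurd h.symm hc
        rw [hp2]
        simp only [Bool.false_eq_true, if_false]
        rw [canc]
        have hp3 : ['-','-','-'].isPrefixOf (c :: t) = false := by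
          simp [List.isPrefixOf]; exact fun h => absurd h.symm hc
        rw [hp3]
        simp
    | (m + 3), rest, hrest =>
        have hrepl : List.replicate (m + 3) '-' ++ rest
            = '-' :: '-' :: '-' :: (List.replicate m '-' ++ rest) := by
          rw [show m + 3 = 3 + m by omega, List.replicate_add]
          simp [List.replicate]
        rw [hrepl, canc]
        have hp : ['-','-','-'].isPrefixOf ('-' :: '-' :: ('-' :: (List.replicate m '-' ++ rest))) = true := by
          simp [List.isPrefixOf]
        rw [if_pos hp]
        simp only [List.drop]
        rw [ih m (by omega)]
        have hm : (m + 3) % 3 = m % 3 := by omega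
        rw [hm]

-- membership of '-' in canc of a run-decomposed list
theorem mem_canc_run (k : Nat) (rest : List Char)
    (hrest : ∀ d, rest.head? = some d → d ≠ '-') :
    ('-' ∈ canc (List.replicate k '-' ++ rest)) ↔
      (k % 3 ≠ 0 ∨ ∃ c t, rest = c :: t ∧ '-' ∈ canc t) := by
  rw [canc_replicate_append k rest hrest]
  cases rest with
  | nil =>
      simp [List.mem_replicate]
  | cons c t =>
      have hc : c ≠ '-' := hrest c rfl
      simp [List.mem_replicate, Ne.symm hc]

-- A's loop skips a dash block by adding its length to the counter
theorem isfsAux_replicate (k : Nat) (rest : List Char) (cnt : Nat) :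
    isfsAux (List.replicate k '-' ++ rest) cnt = isfsAux rest (cnt + k) := by
  induction k generalizing cnt with
  | zero => simp
  | succ m ih =>
      simp only [List.replicate, List.cons_append]
      rw [isfsAux]
      simp only [beq_self_eq_true, if_true]
      rw [ih]
      congr 1
      omega

-- the maximal dash prefix is a replicate of dashes
theorem takeWhile_dash_eq_replicate (l : List Char) :
    l.takeWhile (fun c => c == '-') =
      List.replicate (l.takeWhile (fun c => c == '-')).length '-' := by
  rw [List.eq_replicate_iff]
  refine ⟨rfl, ?_⟩
  intro b hb
  have := List.mem_takeWhile_imp hb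
  simpa using this

-- A's loop from count 0 equals dash-membership after cancellation
theorem isfsAux_eq_mem (n : Nat) : ∀ (l : List Char), l.length ≤ n →
    isfsAux l 0 = decide ('-' ∈ canc l) := by
  induction n with
  | zero =>
      intro l h
      have : l = [] := by cases l <;> simp_all
      subst this; simp [isfsAux, canc]
  | succ n ih =>
      intro l hlen
      set k := (l.takeWhile (fun c => c == '-')).length with hk
      set rest := l.dropWhile (fun c => c == '-') with hrestdef
      have hdecomp : l = List.replicate k '-' ++ rest := by
        conv_lhs => rw [← List.takeWhile_append_dropWhile (p := fun c => c == '-') (l := l)]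
        rw [← takeWhile_dash_eq_replicate]
      have hrest : ∀ d, rest.head? = some d → d ≠ '-' := by
        intro d hd he
        have := List.head?_dropWhile_not (fun c => c == '-') l
        rw [← hrestdef, hd] at this
        simp at this
        exact this (by rw [he])
      have hiff := mem_canc_run k rest hrest
      rw [hdecomp, isfsAux_replicate]
      cases hr : rest with
      | nil =>
          rw [canc_replicate_append k [] (by intro d hd; simp at hd)]
          simp [isfsAux, List.mem_replicate]
      | cons c t =>
          have hiff2 : ('-' ∈ canc (List.replicate k '-' ++ c :: t)) ↔ (k % 3 ≠ 0 ∨ '-' ∈ canc t) := by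
            rw [hr] at hiff
            simpa using hiff
          simp only [hiff2]
          have hc : c ≠ '-' := by apply hrest c; rw [hr]; rfl
          have hcb : (c == '-') = false := by simp [hc]
          rw [isfsAux]
          simp only [hcb, Bool.false_eq_true, if_false, Nat.zero_add]
          have htlen : t.length ≤ n := by
            have hlk : l.length = k + rest.length := by rw [hdecomp]; simp
            rw [hr] at hlk
            simp at hlk
            omega
          by_cases hm : k % 3 = 0
          · simp only [hm, ne_eq, not_true_eq_false, if_false, false_or]
            exact ih t htlen
          · simp [hm]

-- a one-character pattern occurs as an infix exactly when it is an element
theorem singleton_infix_iff (a : Char) (l : List Char) : [a] <:+: l ↔ a ∈ l := by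
  constructor
  · rintro ⟨s, t, rfl⟩
    simp
  · intro h
    obtain ⟨s, t, rfl⟩ := List.append_of_mem h
    exact ⟨s, t, by simp⟩

-- ===== VERDICT (by name: the statement is the Claim_ definition above) =====
theorem is_frameshift_spec : Claim_equal_is_frameshift := by
  intro s _
  unfold Spec_is_frameshift is_frameshift is_frameshift_alt
  rw [PySem.Str.isIn]
  have htl : (PySem.Str.replace s "---" "").toList = canc s.toList := by
    rw [PySem.Str.toList_replace]
    rw [show ("---" : String).toList = ['-','-','-'] from rfl,
        show ("" : String).toList = [] from rfl]
    exact replace_eq_canc s.toList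
  rw [htl, show ("-" : String).toList = ['-'] from rfl]
  rw [PySem.Chars.isIn]
  rw [isfsAux_eq_mem s.toList.length s.toList le_rfl]
  by_cases h : '-' ∈ canc s.toList
  · have : PySem.Chars.find (canc s.toList) ['-'] ≠ -1 := by
      rw [PySem.Chars.find_ne_neg_one_iff, singleton_infix_iff]; exact h
    simp [h, bne_iff_ne, this]
  · have : PySem.Chars.find (canc s.toList) ['-'] = -1 := by
      rw [PySem.Chars.find_eq_neg_one_iff, singleton_infix_iff]; exact h
    simp [h, this]
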